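-- pv_equiv track=rewrite | github.com/gongahkia/yuho | src/yuho/lsp/server.py | _parse_function_call_context
-- ===== SOURCE A (Python) =====
-- def _parse_function_call_context(line_to_cursor: str) -> tuple:
--     """
--     Parse the line to find function call context.
--
--     Returns:
--         Tuple of (function_name, parameter_index) or (None, 0)
--     """
--     # Find the last unclosed parenthesis
--     paren_depth = 0
--     func_end = -1
--
--     for i in range(len(line_to_cursor) - 1, -1, -1):
--         char = line_to_cursor[i]
--         if char == ')':
--             paren_depth += 1
--         elif char == '(':
--             if paren_depth == 0:
--                 func_end = i
--                 break
--             paren_depth -= 1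
--
--     if func_end < 0:
--         return (None, 0)
--
--     # Extract function name before the opening paren
--     func_name_part = line_to_cursor[:func_end].rstrip()
--
--     # Find start of identifier
--     func_start = len(func_name_part)
--     while func_start > 0 and (func_name_part[func_start - 1].isalnum() or
--                                func_name_part[func_start - 1] == '_'):
--         func_start -= 1
--
--     func_name = func_name_part[func_start:]
--     if not func_name or not func_name[0].isalpha():
--         return (None, 0)
--
--     # Count commas to determine parameter index
--     args_part = line_to_cursor[func_end + 1:]
--     param_index = 0
--     paren_depth = 0
--
--     for char in args_part:
--         if char == '(':
--             paren_depth += 1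
--         elif char == ')':
--             paren_depth -= 1
--         elif char == ',' and paren_depth == 0:
--             param_index += 1
--
--     return (func_name, param_index)
-- ===== SOURCE B (Python) =====
-- def _parse_function_call_context(line_to_cursor: str) -> tuple:
--     """Forward single pass with an explicit stack of open-paren indices instead of
--     A's backward depth-counting scan; the stack's top is the rightmost
--     unclosed paren."""
--     stack = []
--     for i, ch in enumerate(line_to_cursor):
--         if ch == '(':
--             stack.append(i)
--         elif ch == ')' and stack:
--             stack.pop()
--
--     if not stack:
--         return (None, 0)
--     func_end = stack[-1]
--
--     # Identifier: walk the rstripped prefix from its right end, collecting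
--     # identifier characters until the first non-identifier character.
--     prefix = line_to_cursor[:func_end].rstrip()
--     ident = []
--     for ch in reversed(prefix):
--         if ch.isalnum() or ch == '_':
--             ident.append(ch)
--         else:
--             break
--     ident.reverse()
--     if not ident or not ident[0].isalpha():
--         return (None, 0)
--
--     # Parameter index: top-level commas after the unclosed paren.
--     depth, idx = 0, 0
--     for ch in line_to_cursor[func_end + 1:]:
--         if ch == '(':
--             depth += 1
--         elif ch == ')':
--             depth -= 1
--         elif ch == ',' and depth == 0:
--             idx += 1
--     return (''.join(ident), idx)
-- ===== Notes on version B (the rewrite author's own statement) =====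
-- stated objective: alternative
-- what changed: Phase 1's backward depth-counting scan is replaced by a single forward pass over the string that maintains an explicit stack of open-paren indices, popped on each close-paren; the rightmost unclosed paren is the final stack top, and the identifier is collected by a break-loop over the reversed prefix instead of an index-walking while loop.
import Mathlib
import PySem

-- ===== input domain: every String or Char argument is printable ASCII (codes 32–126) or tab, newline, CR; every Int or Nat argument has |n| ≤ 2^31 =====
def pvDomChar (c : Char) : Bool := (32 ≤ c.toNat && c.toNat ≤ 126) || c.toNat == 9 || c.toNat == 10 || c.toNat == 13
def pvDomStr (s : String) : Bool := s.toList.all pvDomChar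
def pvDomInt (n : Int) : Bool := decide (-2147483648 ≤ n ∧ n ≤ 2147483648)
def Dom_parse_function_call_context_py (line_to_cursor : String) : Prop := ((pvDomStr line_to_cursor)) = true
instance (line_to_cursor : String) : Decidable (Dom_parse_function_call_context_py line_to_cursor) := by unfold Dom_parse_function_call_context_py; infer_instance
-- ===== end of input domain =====

-- B (port below) replaces A's backward depth-counting scan by a single forward pass
-- keeping an explicit stack of open-paren indices; same results, alternative decomposition.

-- shared: the characters of the string paired with their positions (for-loop index view)
def pvWithIdx : List Char → Nat → List (Nat × Char)
  | [], _ => []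
  | c :: cs, n => (n, c) :: pvWithIdx cs (n + 1)

-- identifier character test: c.isalnum() or c == '_'
def pvIdentChar (c : Char) : Bool := PySem.Chars.isalnum c || c == '_'

-- ===== PORT A =====
-- the backward loop 'for i in range(len-1, -1, -1)': chars with indices, reversed
def aFind : List (Nat × Char) → Int → Int
  | [], _ => -1
  | (i, c) :: rest, depth =>
    if c = ')' then aFind rest (depth + 1)
    else if c = '(' then (if depth = 0 then (i : Int) else aFind rest (depth - 1))
    else aFind rest depth

-- the while loop finding func_start (argument = current func_start)
def aWalk (p : List Char) : Nat → Nat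
  | 0 => 0
  | fs + 1 => if pvIdentChar (p.getD fs ' ') then aWalk p fs else fs + 1

-- the comma-counting loop over args_part
def aCount : List Char → Int → Int → Int
  | [], _, cnt => cnt
  | c :: rest, depth, cnt =>
    if c = '(' then aCount rest (depth + 1) cnt
    else if c = ')' then aCount rest (depth - 1) cnt
    else if c = ',' && depth == 0 then aCount rest depth (cnt + 1)
    else aCount rest depth cnt

def parse_function_call_context_py (line_to_cursor : String) : Option String × Int :=
  let cs := line_to_cursor.toList
  let func_end := aFind (pvWithIdx cs 0).reverse 0
  if func_end < 0 then (none, 0)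
  else
    let func_name_part := PySem.Chars.rstrip (PySem.List.slice cs none (some func_end))
    let func_name := func_name_part.drop (aWalk func_name_part func_name_part.length)
    match func_name with
    | [] => (none, 0)
    | c0 :: _ =>
      if !(PySem.Chars.isalpha c0) then (none, 0)
      else
        let args_part := PySem.List.slice cs (some (func_end + 1)) none
        (some (String.ofList func_name), aCount args_part 0 0)

-- ===== PORT B =====
-- forward pass maintaining the stack of indices of unclosed open parens
def bScan : List (Nat × Char) → List Nat → List Nat
  | [], st => st
  | (i, c) :: rest, st =>
    if c = '(' then bScan rest (i :: st)
    else if c = ')' then bScan rest (match st with | [] => [] | _ :: t => t)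
    else bScan rest st

-- collect identifier chars from the reversed pfx until the first non-identifier char
def bIdent : List Char → List Char → List Char
  | [], acc => acc
  | c :: rest, acc => if pvIdentChar c then bIdent rest (acc ++ [c]) else acc

def parse_function_call_context_py_alt (line_to_cursor : String) : Option String × Int :=
  let cs := line_to_cursor.toList
  match bScan (pvWithIdx cs 0) [] with
  | [] => (none, 0)
  | func_end :: _ =>
    let pfx := PySem.Chars.rstrip (cs.take func_end)
    let ident := (bIdent pfx.reverse []).reverse
    match ident with
    | [] => (none, 0)
    | c0 :: _ =>
      if !(PySem.Chars.isalpha c0) then (none, 0)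
      else
        let r := (cs.drop (func_end + 1)).foldl
          (fun (s : Int × Int) ch =>
            if ch = '(' then (s.1 + 1, s.2)
            else if ch = ')' then (s.1 - 1, s.2)
            else if ch = ',' && s.1 == 0 then (s.1, s.2 + 1)
            else s) (0, 0)
        (some (String.ofList ident), r.2)

-- ===== PRECONDITION & SPEC =====
def Spec_parse_function_call_context_py (line_to_cursor : String) (out : Option String × Int) : Prop := out = parse_function_call_context_py_alt line_to_cursor
instance (line_to_cursor : String) (out : Option String × Int) : Decidable (Spec_parse_function_call_context_py line_to_cursor out) := by unfold Spec_parse_function_call_context_py; infer_instance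

-- ===== CLAIM (what is proved, stated in full; the proofs are below) =====
def Claim_equal_parse_function_call_context_py : Prop := ∀ (line_to_cursor : String), Dom_parse_function_call_context_py line_to_cursor → Spec_parse_function_call_context_py line_to_cursor (parse_function_call_context_py line_to_cursor)

-- ===== LEMMAS AND PROOFS =====

theorem bScan_append (xs ys : List (Nat × Char)) (st : List Nat) :
    bScan (xs ++ ys) st = bScan ys (bScan xs st) := by
  induction xs generalizing st with
  | nil => rfl
  | cons x rest ih =>
    obtain ⟨i, c⟩ := x
    simp only [List.cons_append, bScan]
    split_ifs <;> exact ih _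

-- A's backward scan with debt d reads the d-th frame of B's final stack
theorem aFind_eq_bScan (ps : List (Nat × Char)) (d : Nat) :
    aFind ps.reverse (d : Int) =
      (match (bScan ps [])[d]? with | none => -1 | some i => (i : Int)) := by
  induction ps using List.reverseRecOn generalizing d with
  | nil => cases d <;> rfl
  | append_singleton qs x ih =>
    obtain ⟨i, c⟩ := x
    rw [List.reverse_append, bScan_append]
    simp only [List.reverse_singleton, List.singleton_append, aFind, bScan]
    by_cases hc1 : c = ')'
    · subst hc1
      simp only [reduceIte]
      have h1 : (d : Int) + 1 = ((d + 1 : Nat) : Int) := by push_cast; ring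
      rw [h1, ih (d + 1)]
      cases hq : bScan qs [] with
      | nil => simp
      | cons a t => simp
    · by_cases hc2 : c = '('
      · subst hc2
        simp only [reduceIte]
        cases d with
        | zero => simp
        | succ e =>
          rw [if_neg (by push_cast; omega : ¬ ((e + 1 : Nat) : Int) = 0)]
          have h1 : ((e + 1 : Nat) : Int) - 1 = (e : Int) := by push_cast; ring
          rw [h1, ih e]
          simp
      · simp only [if_neg hc1, if_neg hc2]
        exact ih d

theorem aWalk_le (p : List Char) (n : Nat) : aWalk p n ≤ n := by
  induction n with
  | zero => simp [aWalk]
  | succ m ih => simp only [aWalk]; split_ifs <;> omega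

theorem aWalk_append (q : List Char) (c : Char) (n : Nat) (h : n ≤ q.length) :
    aWalk (q ++ [c]) n = aWalk q n := by
  induction n with
  | zero => rfl
  | succ m ih =>
    simp only [aWalk]
    have hget : (q ++ [c]).getD m ' ' = q.getD m ' ' := by
      simp [List.getD, List.getElem?_append_left (by omega : m < q.length)]
    rw [hget]
    split_ifs with hf
    · exact ih (by omega)
    · rfl

-- A's while-loop identifier equals the reversed takeWhile of the reversed pfx
theorem aWalk_drop (p : List Char) :
    p.drop (aWalk p p.length) = (p.reverse.takeWhile pvIdentChar).reverse := by
  induction p using List.reverseRecOn with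
  | nil => rfl
  | append_singleton q c ih =>
    have hlen : (q ++ [c]).length = q.length + 1 := by simp
    rw [hlen]
    simp only [aWalk]
    have hget : (q ++ [c]).getD q.length ' ' = c := by
      simp [List.getD]
    rw [hget, List.reverse_append]
    by_cases hf : pvIdentChar c
    · rw [if_pos hf, aWalk_append q c q.length le_rfl,
        List.drop_append_of_le_length (aWalk_le q q.length), ih]
      simp [hf]
    · rw [if_neg hf]
      simp [Bool.of_not_eq_true hf]

-- B's break-loop accumulates exactly takeWhile
theorem bIdent_eq (l acc : List Char) : bIdent l acc = acc ++ l.takeWhile pvIdentChar := by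
  induction l generalizing acc with
  | nil => simp [bIdent]
  | cons c rest ih =>
    simp only [bIdent, List.takeWhile_cons]
    split_ifs with hf
    · rw [ih]; simp
    · simp

-- A's two-accumulator comma loop equals B's pair-state fold
theorem aCount_eq_foldl (l : List Char) (d cnt : Int) :
    aCount l d cnt =
      (l.foldl (fun (s : Int × Int) ch =>
        if ch = '(' then (s.1 + 1, s.2)
        else if ch = ')' then (s.1 - 1, s.2)
        else if ch = ',' && s.1 == 0 then (s.1, s.2 + 1)
        else s) (d, cnt)).2 := by
  induction l generalizing d cnt with
  | nil => rfl
  | cons c rest ih =>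
    simp only [aCount, List.foldl_cons]
    split_ifs with h1 h2 h3 <;> simp_all

-- ===== VERDICT (by name: the statement is the Claim_ definition above) =====
theorem parse_function_call_context_py_spec : Claim_equal_parse_function_call_context_py := by
  intro s _
  unfold Spec_parse_function_call_context_py
  unfold parse_function_call_context_py parse_function_call_context_py_alt
  set cs := s.toList with hcs
  cases hst : bScan (pvWithIdx cs 0) [] with
  | nil =>
    have h0 : aFind (pvWithIdx cs 0).reverse 0 = -1 := by
      have h := aFind_eq_bScan (pvWithIdx cs 0) 0
      rw [hst] at h; simpa using h
    simp [h0, hst]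
  | cons fe rest =>
    have h0 : aFind (pvWithIdx cs 0).reverse 0 = (fe : Int) := by
      have h := aFind_eq_bScan (pvWithIdx cs 0) 0
      rw [hst] at h; simpa using h
    simp only [h0, hst]
    rw [if_neg (by simp : ¬ ((fe : Int) < 0))]
    have hslice : PySem.List.slice cs none (some (fe : Int)) = cs.take fe := by
      rw [PySem.List.slice_to cs (by positivity)]; simp
    rw [hslice]
    have hname : (PySem.Chars.rstrip (cs.take fe)).drop
        (aWalk (PySem.Chars.rstrip (cs.take fe)) (PySem.Chars.rstrip (cs.take fe)).length)
        = (bIdent (PySem.Chars.rstrip (cs.take fe)).reverse []).reverse := by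
      rw [aWalk_drop, bIdent_eq]; simp
    rw [hname]
    cases hid : (bIdent (PySem.Chars.rstrip (cs.take fe)).reverse []).reverse with
    | nil => rfl
    | cons c0 tl =>
      by_cases ha : PySem.Chars.isalpha c0
      · simp only [ha, Bool.not_true, Bool.false_eq_true, if_false]
        have hargs : PySem.List.slice cs (some ((fe : Int) + 1)) none = cs.drop (fe + 1) := by
          rw [PySem.List.slice_from cs (by positivity)]
          congr 1
        rw [hargs, aCount_eq_foldl]
      · simp [ha]
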